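-- pv_equiv track=rewrite | github.com/cirosantilli/project-euler-solutions | solvers/912.py | _brute_s
-- ===== SOURCE A (Python) =====
-- def _is_valid_no_111(x: int) -> bool:
--     """Return True if x's binary representation has no substring '111'."""
--     consec = 0
--     while x:
--         if x & 1:
--             consec += 1
--             if consec == 3:
--                 return False
--         else:
--             consec = 0
--         x >>= 1
--     return True
--
-- def _brute_s(n: int) -> int:
--     """Brute-force s_n (only used for tiny n in asserts)."""
--     found = 0
--     x = 1
--     while True:
--         if _is_valid_no_111(x):
--             found += 1
--             if found == n:
--                 return x
--         x += 1
-- ===== SOURCE B (Python) =====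
-- def _brute_s(n: int) -> int:
--     """Brute-force s_n: bit-parallel validity test (x & x>>1 & x>>2), countdown."""
--     x = 0
--     while n > 0:
--         x += 1
--         if x & (x >> 1) & (x >> 2) == 0:
--             n -= 1
--     return x
-- ===== Notes on version B (the rewrite author's own statement) =====
-- stated objective: faster
-- what changed: The per-candidate inner bit-scanning loop with a consecutive-ones counter disappears: B tests 'no 111 in binary' with the single bit-parallel expression x & (x>>1) & (x>>2) == 0 and counts down n directly instead of keeping a found counter plus a helper function.
import Mathlib
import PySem

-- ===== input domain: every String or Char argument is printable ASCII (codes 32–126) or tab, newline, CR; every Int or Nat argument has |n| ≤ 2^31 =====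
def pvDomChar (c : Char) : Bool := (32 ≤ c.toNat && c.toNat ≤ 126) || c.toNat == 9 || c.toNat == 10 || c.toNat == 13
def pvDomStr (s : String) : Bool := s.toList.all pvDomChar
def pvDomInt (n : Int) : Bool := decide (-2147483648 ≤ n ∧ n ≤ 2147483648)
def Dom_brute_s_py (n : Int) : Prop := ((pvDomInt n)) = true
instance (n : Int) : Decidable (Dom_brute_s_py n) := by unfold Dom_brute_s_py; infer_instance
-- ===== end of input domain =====

-- B replaces A's per-candidate inner bit-scanning loop by the bit-parallel test
-- x &&& (x >>> 1) &&& (x >>> 2) == 0 and counts n down directly (objective: faster, constant factor).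
-- Both while-loops are made total with the same large fuel constant (returning 0 on exhaustion,
-- which is never reached for the n admitted here); the fuel is a totality guard, not an algorithm switch.
def pvFuel : Nat := 2 ^ 500

-- ===== PORT A =====
-- _is_valid_no_111: scan bits from the LSB with a consecutive-ones counter.
-- Called only with x ≥ 1 by _brute_s, so the scanned value is carried as a Nat (x >>= 1 is x / 2).
def validAux (consec : Nat) (x : Nat) : Bool :=
  if x = 0 then true
  else if x % 2 = 1 then
    (if consec + 1 = 3 then false else validAux (consec + 1) (x / 2))
  else validAux 0 (x / 2)
termination_by x
decreasing_by all_goals exact Nat.div_lt_self (by omega) (by omega)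

def loopA (fuel : Nat) (n found : Int) (x : Nat) : Int :=
  match fuel with
  | 0 => 0
  | f + 1 =>
    if validAux 0 x then
      (if found + 1 = n then (x : Int) else loopA f n (found + 1) (x + 1))
    else loopA f n found (x + 1)

def brute_s_py (n : Int) : Int := loopA pvFuel n 0 1

-- ===== PORT B =====
def loopB (fuel : Nat) (k : Int) (x : Nat) : Int :=
  if k ≤ 0 then (x : Int)
  else
    match fuel with
    | 0 => 0
    | f + 1 =>
      if (x + 1) &&& ((x + 1) >>> 1) &&& ((x + 1) >>> 2) == 0 then loopB f (k - 1) (x + 1)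
      else loopB f k (x + 1)
termination_by fuel

def brute_s_py_alt (n : Int) : Int := loopB pvFuel n 0

-- ===== PRECONDITION & SPEC =====
-- A's outer loop returns only when found reaches n, i.e. only for n ≥ 1; for n ≤ 0 the Python A
-- never terminates, so exactly those inputs are excluded.
def Pre_brute_s_py (n : Int) : Prop := 1 ≤ n
instance (n : Int) : Decidable (Pre_brute_s_py n) := by unfold Pre_brute_s_py; infer_instance
def pvWitness_brute_s_py : Int := (3)

def Spec_brute_s_py (n : Int) (out : Int) : Prop := out = brute_s_py_alt n
instance (n : Int) (out : Int) : Decidable (Spec_brute_s_py n out) := by unfold Spec_brute_s_py; infer_instance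

-- ===== CLAIM (what is proved, stated in full; the proofs are below) =====
def Claim_equal_brute_s_py : Prop := ∀ (n : Int), Dom_brute_s_py n → Pre_brute_s_py n → Spec_brute_s_py n (brute_s_py n)

-- ===== LEMMAS AND PROOFS =====

-- B's bit-parallel test as a Bool, and its per-bit unfolding.
def noTrip (x : Nat) : Bool := x &&& (x >>> 1) &&& (x >>> 2) == 0

lemma noTrip_iff (x : Nat) :
    noTrip x = true ↔ ∀ i, ¬(x.testBit i ∧ x.testBit (i + 1) ∧ x.testBit (i + 2)) := by
  unfold noTrip
  rw [beq_iff_eq]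
  constructor
  · rintro h i ⟨b1, b2, b3⟩
    have := congrArg (Nat.testBit · i) h
    simp [Nat.testBit_and, Nat.testBit_shiftRight, Nat.add_comm] at this
    rw [this b1 b2] at b3
    exact absurd b3 (by simp)
  · intro h
    apply Nat.eq_of_testBit_eq
    intro i
    simp [Nat.testBit_and, Nat.testBit_shiftRight, Nat.add_comm]
    intro h1 h2
    by_contra hc
    rw [Bool.not_eq_false] at hc
    exact h i ⟨h1, h2, hc⟩

lemma noTrip_div2 (x : Nat) :
    noTrip x = (!(x.testBit 0 && x.testBit 1 && x.testBit 2) && noTrip (x / 2)) := by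
  rw [Bool.eq_iff_iff, Bool.and_eq_true, Bool.not_eq_true', noTrip_iff, noTrip_iff]
  constructor
  · intro h
    refine ⟨?_, fun i hi => h (i + 1) (by simpa [Nat.testBit_div_two] using hi)⟩
    have := h 0
    cases hb0 : x.testBit 0 <;> cases hb1 : x.testBit 1 <;> cases hb2 : x.testBit 2 <;> simp_all
  · rintro ⟨h0, h⟩ i hi
    cases i with
    | zero => simp_all
    | succ j => exact h j (by simpa [Nat.testBit_div_two] using hi)

-- the meaning of validAux's consec state in terms of B's test and the two lowest bits
def vspec (c : Nat) (x : Nat) : Bool :=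
  noTrip x &&
    (match c with
     | 0 => true
     | 1 => !(x.testBit 0 && x.testBit 1)
     | _ => !x.testBit 0)

lemma testBit_zero_mod (x : Nat) : x.testBit 0 = decide (x % 2 = 1) := by
  rcases Nat.mod_two_eq_zero_or_one x with h | h <;>
    simp [Nat.testBit_zero, h]

lemma validAux_eq_vspec (x : Nat) : ∀ c, c ≤ 2 → validAux c x = vspec c x := by
  induction x using Nat.strong_induction_on with
  | _ x ih =>
    intro c hc
    rw [validAux]
    by_cases h0 : x = 0
    · subst h0
      rcases c with _ | _ | c <;> simp [vspec, noTrip]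
    · rw [if_neg h0]
      have hlt : x / 2 < x := Nat.div_lt_self (by omega) (by omega)
      have hd := noTrip_div2 x
      have hbd : ∀ i, (x / 2).testBit i = x.testBit (i + 1) := fun i => Nat.testBit_div_two ..
      by_cases h1 : x % 2 = 1
      · rw [if_pos h1]
        have hb0 : x.testBit 0 = true := by rw [testBit_zero_mod]; simpa using h1
        by_cases h2 : c + 1 = 3
        · rw [if_pos h2]
          have hc2 : c = 2 := by omega
          subst hc2
          simp [vspec, hb0]
        · rw [if_neg h2]
          rw [ih (x / 2) hlt (c + 1) (by omega)]
          interval_cases c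
          · simp only [vspec, hbd, hd, hb0]
            cases hx1 : x.testBit 1 <;> cases hx2 : x.testBit 2 <;>
              cases hnt : noTrip (x / 2) <;> simp
          · simp only [vspec, hbd, hd, hb0]
            cases hx1 : x.testBit 1 <;> cases hx2 : x.testBit 2 <;>
              cases hnt : noTrip (x / 2) <;> simp
          · omega
      · rw [if_neg h1]
        have hb0 : x.testBit 0 = false := by
          rw [testBit_zero_mod]; simp; omega
        rw [ih (x / 2) hlt 0 (by omega)]
        interval_cases c
        · simp only [vspec, hd, hb0]
          cases hnt : noTrip (x / 2) <;> simp
        · simp only [vspec, hd, hb0]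
          cases hnt : noTrip (x / 2) <;> simp
        · simp only [vspec, hd, hb0]
          cases hnt : noTrip (x / 2) <;> simp

lemma validAux_zero_eq_noTrip (x : Nat) : validAux 0 x = noTrip x := by
  rw [validAux_eq_vspec x 0 (by omega)]
  simp [vspec]

lemma loopA_eq_loopB (f : Nat) :
    ∀ (n found : Int) (x : Nat), found + 1 ≤ n →
      loopA f n found (x + 1) = loopB f (n - found) x := by
  induction f with
  | zero =>
    intro n found x h
    rw [loopA, loopB.eq_def]
    have hk : ¬ n - found ≤ 0 := by omega
    simp [hk]
  | succ f ih =>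
    intro n found x h
    rw [loopA, loopB.eq_def]
    have hk : ¬ n - found ≤ 0 := by omega
    rw [if_neg hk]
    rw [validAux_zero_eq_noTrip]
    unfold noTrip
    cases ht : ((x + 1) &&& ((x + 1) >>> 1) &&& ((x + 1) >>> 2) == 0) with
    | false =>
      simp only [Bool.false_eq_true, if_false]
      exact ih n found (x + 1) h
    | true =>
      simp only [if_true]
      by_cases hf : found + 1 = n
      · rw [if_pos hf]
        rw [loopB.eq_def]
        have hz : n - found - 1 ≤ 0 := by omega
        rw [if_pos hz]
      · rw [if_neg hf]
        have := ih n (found + 1) (x + 1) (by omega)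
        rw [this]
        congr 1
        omega

-- ===== VERDICT (by name: the statement is the Claim_ definition above) =====
theorem brute_s_py_spec : Claim_equal_brute_s_py := by
  intro n _ hpre
  unfold Spec_brute_s_py brute_s_py brute_s_py_alt
  have h1 : (0 : Int) + 1 ≤ n := by exact_mod_cast hpre
  have := loopA_eq_loopB pvFuel n 0 0 h1
  simpa using this
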